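-- pv_equiv track=rewrite | github.com/Amaradona-max/pronostici-serie-a | backend/app/services/providers/api_football.py | _map_injury_severity
-- ===== SOURCE A (Python) =====
-- def _map_injury_severity(injury_reason: str) -> str:
--     """
--     Map injury description to severity level.
--     Heuristic based on common keywords.
--     """
--     reason_lower = injury_reason.lower()
--
--     # Severe injuries (3+ months)
--     severe_keywords = ['acl', 'cruciate', 'fracture', 'surgery', 'rupture', 'broken']
--     if any(word in reason_lower for word in severe_keywords):
--         return 'severe'
--
--     # Major injuries (1-3 months)
--     major_keywords = ['muscle', 'hamstring', 'groin', 'thigh', 'calf', 'ligament']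
--     if any(word in reason_lower for word in major_keywords):
--         return 'major'
--
--     # Moderate injuries (2-4 weeks)
--     moderate_keywords = ['ankle', 'knee', 'back', 'shoulder', 'strain']
--     if any(word in reason_lower for word in moderate_keywords):
--         return 'moderate'
--
--     # Minor injuries (< 2 weeks)
--     return 'minor'
-- ===== SOURCE B (Python) =====
-- # Single pass over a rank table keeping the minimum severity rank, then one lookup.
-- _RANKED = [
--     ('acl', 0), ('cruciate', 0), ('fracture', 0), ('surgery', 0), ('rupture', 0), ('broken', 0),
--     ('muscle', 1), ('hamstring', 1), ('groin', 1), ('thigh', 1), ('calf', 1), ('ligament', 1),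
--     ('ankle', 2), ('knee', 2), ('back', 2), ('shoulder', 2), ('strain', 2),
-- ]
-- _LABELS = ('severe', 'major', 'moderate', 'minor')
--
-- def _map_injury_severity(injury_reason: str) -> str:
--     low = injury_reason.lower()
--     best = 3
--     for kw, rank in _RANKED:
--         if rank < best and kw in low:
--             best = rank
--     return _LABELS[best]
-- ===== Notes on version B (the rewrite author's own statement) =====
-- stated objective: alternative
-- what changed: Replaces the three-tier early-exit keyword cascade by one pass over a single keyword->rank table that keeps the minimum rank found, then a single label lookup.
import Mathlib
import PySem

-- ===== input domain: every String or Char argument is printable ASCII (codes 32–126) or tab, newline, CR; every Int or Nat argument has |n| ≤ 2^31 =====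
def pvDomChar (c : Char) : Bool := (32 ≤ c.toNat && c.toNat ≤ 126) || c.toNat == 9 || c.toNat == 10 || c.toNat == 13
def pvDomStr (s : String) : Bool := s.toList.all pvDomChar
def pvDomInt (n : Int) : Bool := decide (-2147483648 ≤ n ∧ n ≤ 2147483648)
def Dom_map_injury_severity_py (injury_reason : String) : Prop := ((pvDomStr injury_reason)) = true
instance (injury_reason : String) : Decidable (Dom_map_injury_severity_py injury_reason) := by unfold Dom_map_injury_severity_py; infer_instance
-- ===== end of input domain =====

-- B replaces A's three-tier early-exit keyword cascade by one pass over a single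
-- keyword->rank table keeping the minimum rank, then a label lookup (alternative decomposition).


-- ===== PORT A =====
def map_injury_severity_py (injury_reason : String) : String :=
  let reason_lower := PySem.Str.lower injury_reason
  let severe_keywords := ["acl", "cruciate", "fracture", "surgery", "rupture", "broken"]
  if severe_keywords.any (fun word => PySem.Str.isIn word reason_lower) then "severe"
  else
    let major_keywords := ["muscle", "hamstring", "groin", "thigh", "calf", "ligament"]
    if major_keywords.any (fun word => PySem.Str.isIn word reason_lower) then "major"
    else
      let moderate_keywords := ["ankle", "knee", "back", "shoulder", "strain"]
      if moderate_keywords.any (fun word => PySem.Str.isIn word reason_lower) then "moderate"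
      else "minor"

-- ===== PORT B =====
def pvRanked : List (String × Nat) :=
  [("acl", 0), ("cruciate", 0), ("fracture", 0), ("surgery", 0), ("rupture", 0), ("broken", 0),
   ("muscle", 1), ("hamstring", 1), ("groin", 1), ("thigh", 1), ("calf", 1), ("ligament", 1),
   ("ankle", 2), ("knee", 2), ("back", 2), ("shoulder", 2), ("strain", 2)]

def pvLabels : List String := ["severe", "major", "moderate", "minor"]

def pvStep (low : String) (b : Nat) (p : String × Nat) : Nat :=
  if p.2 < b ∧ PySem.Str.isIn p.1 low then p.2 else b

def map_injury_severity_py_alt (injury_reason : String) : String :=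
  let low := PySem.Str.lower injury_reason
  let best := pvRanked.foldl (pvStep low) 3
  pvLabels.getD best "minor"

-- ===== PRECONDITION & SPEC =====
def Spec_map_injury_severity_py (injury_reason : String) (out : String) : Prop := out = map_injury_severity_py_alt injury_reason
instance (injury_reason : String) (out : String) : Decidable (Spec_map_injury_severity_py injury_reason out) := by unfold Spec_map_injury_severity_py; infer_instance

-- ===== CLAIM (what is proved, stated in full; the proofs are below) =====
def Claim_equal_map_injury_severity_py : Prop := ∀ (injury_reason : String), Dom_map_injury_severity_py injury_reason → Spec_map_injury_severity_py injury_reason (map_injury_severity_py injury_reason)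

-- ===== LEMMAS AND PROOFS =====

-- once the best rank is ≤ every remaining rank, the fold no longer changes it
theorem pv_fold_ge (low : String) (l : List (String × Nat)) (b : Nat)
    (h : ∀ p ∈ l, b ≤ p.2) : l.foldl (pvStep low) b = b := by
  induction l with
  | nil => rfl
  | cons p ps ih =>
    have hb : b ≤ p.2 := h p (by simp)
    have : pvStep low b p = b := by
      simp [pvStep]; intro h1; omega
    rw [List.foldl_cons, this]
    exact ih (fun q hq => h q (by simp [hq]))

-- a block of keywords all carrying the same rank r < b folds to r iff some keyword matches
theorem pv_fold_block (low : String) (kws : List String) (r b : Nat) (h : r < b) :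
    (kws.map (fun k => (k, r))).foldl (pvStep low) b =
      if kws.any (fun k => PySem.Str.isIn k low) then r else b := by
  induction kws generalizing b with
  | nil => simp
  | cons k ks ih =>
    by_cases hk : PySem.Str.isIn k low = true
    · have hk' : PySem.Chars.isIn k.toList low.toList = true := by simpa using hk
      have hstep : pvStep low b (k, r) = r := by simp [pvStep, h, hk']
      rw [List.map_cons, List.foldl_cons, hstep,
          pv_fold_ge low _ r (by simp)]
      simp [hk']
    · have hk' : PySem.Chars.isIn k.toList low.toList = false := by simpa using hk
      have hstep : pvStep low b (k, r) = b := by simp [pvStep, hk']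
      rw [List.map_cons, List.foldl_cons, hstep, ih b h]
      simp [hk']

theorem pvRanked_split :
    pvRanked =
      (["acl", "cruciate", "fracture", "surgery", "rupture", "broken"].map (fun k => (k, 0)))
      ++ (["muscle", "hamstring", "groin", "thigh", "calf", "ligament"].map (fun k => (k, 1)))
      ++ (["ankle", "knee", "back", "shoulder", "strain"].map (fun k => (k, 2))) := rfl

-- ===== VERDICT (by name: the statement is the Claim_ definition above) =====
theorem map_injury_severity_py_spec : Claim_equal_map_injury_severity_py := by
  intro s _
  show map_injury_severity_py s = map_injury_severity_py_alt s
  unfold map_injury_severity_py map_injury_severity_py_alt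
  dsimp only
  rw [pvRanked_split, List.foldl_append, List.foldl_append]
  set low := PySem.Str.lower s with hlow
  rw [pv_fold_block low _ 0 3 (by omega)]
  by_cases h0 : (["acl", "cruciate", "fracture", "surgery", "rupture", "broken"].any
      (fun word => PySem.Str.isIn word low)) = true
  · rw [if_pos h0, if_pos h0, pv_fold_ge low _ 0 (by simp),
        pv_fold_ge low _ 0 (by simp)]
    rfl
  · rw [if_neg h0, if_neg h0, pv_fold_block low _ 1 3 (by omega)]
    by_cases h1 : (["muscle", "hamstring", "groin", "thigh", "calf", "ligament"].any
        (fun word => PySem.Str.isIn word low)) = true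
    · rw [if_pos h1, if_pos h1, pv_fold_ge low _ 1 (by simp)]
      rfl
    · rw [if_neg h1, if_neg h1, pv_fold_block low _ 2 3 (by omega)]
      by_cases h2 : (["ankle", "knee", "back", "shoulder", "strain"].any
          (fun word => PySem.Str.isIn word low)) = true
      · rw [if_pos h2, if_pos h2]; rfl
      · rw [if_neg h2, if_neg h2]; rfl
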